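-- pv_equiv track=rewrite | github.com/janrth/replenishment | src/replenishment/io.py | _validate_periods
-- ===== SOURCE A (Python) =====
-- from collections.abc import Iterable, Iterator, Mapping
--
-- def _validate_periods(unique_id: str, period_rows: Mapping[int, object]) -> int:
--     if not period_rows:
--         raise ValueError(f"No periods provided for unique_id '{unique_id}'.")
--     max_period = max(period_rows)
--     expected = set(range(max_period + 1))
--     missing = expected.difference(period_rows.keys())
--     if missing:
--         missing_display = ", ".join(str(period) for period in sorted(missing))
--         raise ValueError(
--             f"Missing periods for unique_id '{unique_id}': {missing_display}."
--         )
--     return max_period + 1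
-- ===== SOURCE B (Python) =====
-- def _validate_periods(unique_id: str, period_rows) -> int:
--     if not period_rows:
--         raise ValueError(f"No periods provided for unique_id '{unique_id}'.")
--     keys = sorted(period_rows)
--     max_period = keys[-1]
--     missing = []
--     expected = 0
--     for k in keys:
--         if k > expected:
--             missing.extend(range(expected, k))
--             expected = k
--         if k == expected:
--             expected += 1
--     missing.extend(range(expected, max_period + 1))
--     if missing:
--         missing_display = ", ".join(str(period) for period in missing)
--         raise ValueError(
--             f"Missing periods for unique_id '{unique_id}': {missing_display}."
--         )
--     return max_period + 1
-- ===== Notes on version B (the rewrite author's own statement) =====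
-- stated objective: alternative
-- what changed: B replaces A's 'build the full expected set 0..max, take a set difference, sort the missing set' with a sort of the keys followed by a single linear gap-scan with a running expected counter that accumulates missing periods already in ascending order.
import Mathlib
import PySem

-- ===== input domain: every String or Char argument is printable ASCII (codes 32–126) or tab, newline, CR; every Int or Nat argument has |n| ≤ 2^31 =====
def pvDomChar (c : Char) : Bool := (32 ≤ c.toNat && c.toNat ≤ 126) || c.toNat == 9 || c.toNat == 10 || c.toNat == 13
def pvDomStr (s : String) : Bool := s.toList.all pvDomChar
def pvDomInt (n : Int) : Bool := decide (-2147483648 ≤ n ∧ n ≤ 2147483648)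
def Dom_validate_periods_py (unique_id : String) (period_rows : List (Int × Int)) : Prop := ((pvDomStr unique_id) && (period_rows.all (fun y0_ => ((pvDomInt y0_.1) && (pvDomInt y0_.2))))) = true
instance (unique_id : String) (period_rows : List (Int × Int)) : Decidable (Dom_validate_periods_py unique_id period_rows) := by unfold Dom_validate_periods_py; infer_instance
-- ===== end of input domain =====

-- B replaces A's "build the expected set 0..max, set-difference, sort the missing" with a
-- sort of the keys followed by a single linear gap-scan; same value everywhere A returns.


-- ===== PORT A =====
-- dict iteration = distinct keys in first-insertion order; PySem.List.dedup is exact for that.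
-- The two 'raise ValueError' paths are excluded by Pre_; the port returns 0 there.
def validate_periods_py (unique_id : String) (period_rows : List (Int × Int)) : Int :=
  if period_rows = [] then 0
  else
    match PySem.List.max? (PySem.List.dedup (period_rows.map Prod.fst)) (fun x => x) with
    | none => 0
    | some max_period =>
      let expected : PySem.Set Int := PySem.Set.ofList (PySem.List.pyRange 0 (max_period + 1) 1)
      let missing : PySem.Set Int := PySem.Set.diff expected (PySem.List.dedup (period_rows.map Prod.fst))
      if missing ≠ [] then 0 else max_period + 1

-- ===== PORT B =====
-- one step of B's loop body over state (missing, expected); range-extend models the two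
-- 'if k > expected' / 'if k == expected' branches literally
def pvAltStep (st : List Int × Int) (k : Int) : List Int × Int :=
  let st1 := if st.2 < k then (st.1 ++ PySem.List.pyRange st.2 k 1, k) else st
  if k = st1.2 then (st1.1, st1.2 + 1) else st1

def validate_periods_py_alt (unique_id : String) (period_rows : List (Int × Int)) : Int :=
  if period_rows = [] then 0
  else
    let keys := PySem.List.sorted (PySem.List.dedup (period_rows.map Prod.fst)) (fun x => x) false
    let max_period := PySem.List.pyGetD keys (-1) 0
    let st := keys.foldl pvAltStep ([], 0)
    let missing := st.1 ++ PySem.List.pyRange st.2 (max_period + 1) 1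
    if missing ≠ [] then 0 else max_period + 1

-- ===== PRECONDITION & SPEC =====
-- the maximum key of a nonempty dict (0 for the empty one)
def pvMaxKey (period_rows : List (Int × Int)) : Int :=
  match period_rows.map Prod.fst with
  | [] => 0
  | k :: t => t.foldl max k

-- Pre_ excludes exactly the two ValueError raises of A: the empty dict, and a dict whose
-- key set does not contain every integer 0..max_key.
def Pre_validate_periods_py (unique_id : String) (period_rows : List (Int × Int)) : Prop :=
  period_rows ≠ [] ∧
  ∀ i ∈ PySem.List.pyRange 0 (pvMaxKey period_rows + 1) 1, i ∈ period_rows.map Prod.fst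
instance (unique_id : String) (period_rows : List (Int × Int)) : Decidable (Pre_validate_periods_py unique_id period_rows) := by unfold Pre_validate_periods_py; infer_instance

def pvWitness_validate_periods_py : String × (List (Int × Int)) := ("u", [(1, 5), (0, 7), (2, 9)])

def Spec_validate_periods_py (unique_id : String) (period_rows : List (Int × Int)) (out : Int) : Prop := out = validate_periods_py_alt unique_id period_rows
instance (unique_id : String) (period_rows : List (Int × Int)) (out : Int) : Decidable (Spec_validate_periods_py unique_id period_rows out) := by unfold Spec_validate_periods_py; infer_instance

-- ===== CLAIM (what is proved, stated in full; the proofs are below) =====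
def Claim_equal_validate_periods_py : Prop := ∀ (unique_id : String) (period_rows : List (Int × Int)), Dom_validate_periods_py unique_id period_rows → Pre_validate_periods_py unique_id period_rows → Spec_validate_periods_py unique_id period_rows (validate_periods_py unique_id period_rows)

-- ===== LEMMAS AND PROOFS =====

-- foldl max is a member and an upper bound
theorem pv_foldl_max_mem (c : Int) (t : List Int) : t.foldl max c ∈ c :: t := by
  induction t generalizing c with
  | nil => simp
  | cons x xs ih =>
    rcases List.mem_cons.mp (ih (max c x)) with h | h
    · rw [List.foldl_cons, h]
      rcases max_choice c x with hm | hm <;> simp [hm]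
    · simp [List.foldl_cons, h]

theorem pv_le_foldl_max (c : Int) (t : List Int) : ∀ y ∈ c :: t, y ≤ t.foldl max c := by
  induction t generalizing c with
  | nil => simp
  | cons x xs ih =>
    intro y hy
    rw [List.foldl_cons]
    rcases List.mem_cons.mp hy with h | h
    · have hm : max c x ≤ List.foldl max (max c x) xs :=
        ih (max c x) (max c x) (List.mem_cons_self ..)
      exact le_trans (le_of_eq h) (le_trans (le_max_left c x) hm)
    · rcases List.mem_cons.mp h with h | h
      · have hm : max c x ≤ List.foldl max (max c x) xs :=
          ih (max c x) (max c x) (List.mem_cons_self ..)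
        exact le_trans (le_of_eq h) (le_trans (le_max_right c x) hm)
      · exact ih (max c x) y (by simp [h])

theorem pv_maxKey_mem (period_rows : List (Int × Int)) (h : period_rows ≠ []) :
    pvMaxKey period_rows ∈ period_rows.map Prod.fst := by
  cases hk : period_rows.map Prod.fst with
  | nil => exact absurd (List.map_eq_nil_iff.mp hk) h
  | cons c t =>
    simp only [pvMaxKey, hk]
    exact pv_foldl_max_mem c t

theorem pv_le_maxKey (period_rows : List (Int × Int)) :
    ∀ y ∈ period_rows.map Prod.fst, y ≤ pvMaxKey period_rows := by
  intro y hy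
  cases hk : period_rows.map Prod.fst with
  | nil => rw [hk] at hy; simp at hy
  | cons c t =>
    simp only [pvMaxKey, hk]
    rw [hk] at hy
    exact pv_le_foldl_max c t y hy

-- in a strictly sorted list every element is ≤ the last one
theorem pv_le_getLast (l : List Int) (hl : l.Pairwise (· < ·)) (h : l ≠ []) :
    ∀ y ∈ l, y ≤ l.getLast h := by
  induction l with
  | nil => simp at h
  | cons x xs ih =>
    intro y hy
    cases xs with
    | nil => simp_all
    | cons z zs =>
      have hne : z :: zs ≠ [] := by simp
      rw [List.getLast_cons hne]
      have hpl := List.pairwise_cons.mp hl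
      rcases List.mem_cons.mp hy with h1 | h1
      · subst h1
        have hx : y < z := hpl.1 z (by simp)
        have hz := ih hpl.2 hne z (by simp)
        omega
      · exact ih hpl.2 hne y h1

-- B's gap-scan loop: over a strictly increasing list bounded by m that contains every
-- integer from e to m, starting from ([], e) with 0 ≤ e, it reports no missing period and
-- ends with expected = m+1 (or e unchanged when e > m).
theorem pv_fold_cover (l : List Int) (m : Int) :
    l.Pairwise (· < ·) → (∀ x ∈ l, x ≤ m) →
    ∀ e : Int, 0 ≤ e → (∀ i : Int, e ≤ i → i ≤ m → i ∈ l) →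
    l.foldl pvAltStep ([], e) = ([], if e ≤ m then m + 1 else e) := by
  induction l with
  | nil =>
    intro _ _ e _ hcov
    have : ¬ e ≤ m := fun h => by simpa using hcov e le_rfl h
    simp [this]
  | cons k rest ih =>
    intro hp hub e he hcov
    have hpr := (List.pairwise_cons.mp hp).2
    have hkrest := (List.pairwise_cons.mp hp).1
    have hubr : ∀ x ∈ rest, x ≤ m := fun x hx => hub x (by simp [hx])
    by_cases hlt : e < k
    · exfalso
      have hkm : k ≤ m := hub k (by simp)
      have : e ∈ k :: rest := hcov e le_rfl (by omega)
      rcases List.mem_cons.mp this with h | h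
      · omega
      · have := hkrest e h; omega
    · by_cases heq : k = e
      · subst heq
        have hstep : pvAltStep ([], k) k = ([], k + 1) := by
          simp [pvAltStep]
        rw [List.foldl_cons, hstep]
        have hkm : k ≤ m := hub k (by simp)
        have := ih hpr hubr (k + 1) (by omega) (fun i h1 h2 => by
          rcases List.mem_cons.mp (hcov i (by omega) h2) with h | h
          · omega
          · exact h)
        rw [this]
        by_cases h2 : k + 1 ≤ m
        · simp [h2, hkm]
        · have h3 : k = m := by omega
          simp [h3]
      · have hstep : pvAltStep ([], e) k = ([], e) := by
          simp [pvAltStep, hlt, heq]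
        rw [List.foldl_cons, hstep]
        exact ih hpr hubr e he (fun i h1 h2 => by
          rcases List.mem_cons.mp (hcov i h1 h2) with h | h
          · omega
          · exact h)

theorem validate_periods_py_alt_eval (unique_id : String) (period_rows : List (Int × Int))
    (hpre : Pre_validate_periods_py unique_id period_rows) :
    validate_periods_py_alt unique_id period_rows = pvMaxKey period_rows + 1 := by
  obtain ⟨hne, hcov⟩ := hpre
  set ks := PySem.List.dedup (period_rows.map Prod.fst) with hks
  set s := PySem.List.sorted ks (fun x : Int => x) false with hs
  have hmemks : ∀ x : Int, x ∈ ks ↔ x ∈ period_rows.map Prod.fst := fun x => by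
    rw [hks]; simp
  have hmems : ∀ x : Int, x ∈ s ↔ x ∈ period_rows.map Prod.fst := fun x => by
    rw [hs, PySem.List.mem_sorted]; exact hmemks x
  have hsne : s ≠ [] := by
    intro h
    have := (hmems (pvMaxKey period_rows)).mpr (pv_maxKey_mem _ hne)
    simp [h] at this
  have hpair : s.Pairwise (· < ·) := by
    rw [hs, hks, PySem.List.dedup_eq_ofList]
    exact PySem.List.sorted_ofList_pairwise_lt _
  have hub : ∀ x ∈ s, x ≤ pvMaxKey period_rows := fun x hx =>
    pv_le_maxKey _ x ((hmems x).mp hx)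
  have hlast : s.getLast hsne = pvMaxKey period_rows := by
    have h1 := pv_le_getLast s hpair hsne (pvMaxKey period_rows)
      ((hmems _).mpr (pv_maxKey_mem _ hne))
    have h2 := hub (s.getLast hsne) (List.getLast_mem hsne)
    omega
  have hcov' : ∀ i : Int, (0:Int) ≤ i → i ≤ pvMaxKey period_rows → i ∈ s := by
    intro i h1 h2
    exact (hmems i).mpr (hcov i (by rw [PySem.List.mem_pyRange_one]; omega))
  have hfold := pv_fold_cover s (pvMaxKey period_rows) hpair hub 0 le_rfl hcov'
  unfold validate_periods_py_alt
  rw [if_neg hne]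
  dsimp only
  rw [← hks, ← hs, PySem.List.pyGetD_neg_one s 0 hsne, hlast, hfold]
  by_cases hm : (0:Int) ≤ pvMaxKey period_rows
  · simp only [hm, if_true]
    have h1 : PySem.List.pyRange (pvMaxKey period_rows + 1) (pvMaxKey period_rows + 1) 1 = [] := by
      simp [PySem.List.pyRange]
    simp [h1]
  · simp only [hm, if_false]
    have h1 : PySem.List.pyRange 0 (pvMaxKey period_rows + 1) 1 = [] := by
      apply List.eq_nil_iff_forall_not_mem.mpr
      intro a ha
      rw [PySem.List.mem_pyRange_one] at ha
      omega
    simp [h1]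

theorem validate_periods_py_eval (unique_id : String) (period_rows : List (Int × Int))
    (hpre : Pre_validate_periods_py unique_id period_rows) :
    validate_periods_py unique_id period_rows = pvMaxKey period_rows + 1 := by
  obtain ⟨hne, hcov⟩ := hpre
  set ks := PySem.List.dedup (period_rows.map Prod.fst) with hks
  have hmemks : ∀ x : Int, x ∈ ks ↔ x ∈ period_rows.map Prod.fst := fun x => by
    rw [hks]; simp
  have hksne : ks ≠ [] := by
    intro h
    have := (hmemks (pvMaxKey period_rows)).mpr (pv_maxKey_mem _ hne)
    simp [h] at this
  unfold validate_periods_py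
  rw [if_neg hne]
  dsimp only
  rw [← hks]
  cases hk : ks with
  | nil => exact absurd hk hksne
  | cons c t =>
    rw [PySem.List.max?_id_cons]
    dsimp only
    have hM : t.foldl max c = pvMaxKey period_rows := by
      have h1 : t.foldl max c ≤ pvMaxKey period_rows :=
        pv_le_maxKey _ _ ((hmemks _).mp (hk ▸ pv_foldl_max_mem c t))
      have h2 : pvMaxKey period_rows ≤ t.foldl max c := by
        have := pv_le_foldl_max c t (pvMaxKey period_rows)
        rw [← hk] at this
        exact this ((hmemks _).mpr (pv_maxKey_mem _ hne))
      omega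
    have hmissing :
        PySem.Set.diff (PySem.Set.ofList (PySem.List.pyRange 0 (t.foldl max c + 1) 1)) (c :: t) = [] := by
      rw [PySem.Set.diff, List.filter_eq_nil_iff]
      intro a ha
      rw [PySem.Set.mem_ofList _ a] at ha
      have haa : a ∈ period_rows.map Prod.fst := by
        apply hcov
        rw [PySem.List.mem_pyRange_one] at ha ⊢
        omega
      have hmem : a ∈ (c :: t) := hk ▸ (hmemks a).mpr haa
      simp [PySem.Set.contains, hmem]
    rw [hmissing]
    simp [hM]

-- ===== VERDICT (by name: the statement is the Claim_ definition above) =====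
theorem validate_periods_py_spec : Claim_equal_validate_periods_py := by
  intro unique_id period_rows _ hpre
  unfold Spec_validate_periods_py
  rw [validate_periods_py_eval unique_id period_rows hpre,
      validate_periods_py_alt_eval unique_id period_rows hpre]
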